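-- pv_equiv track=rewrite | github.com/matheushnobre/problemas-beecrowd | python/matematica/ex1138.py | contar_digitos
-- ===== SOURCE A (Python) =====
-- def contar_digitos(inicio, fim):
--     sequencia = ''
--     while inicio <= fim:
--         sequencia += str(inicio) + ' '
--         inicio += 1
--
--     resposta = ''
--     for i in range(10):
--         resposta += str(sequencia.count(str(i))) + ' '
--
--     return resposta
-- ===== SOURCE B (Python) =====
-- def contar_digitos(inicio, fim):
--     counts = [0] * 10
--     for k in range(inicio, fim + 1):
--         m = -k if k < 0 else k
--         if m == 0:
--             counts[0] += 1
--         else: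
--             while m > 0:
--                 counts[m % 10] += 1
--                 m //= 10
--     resposta = ''
--     for c in counts:
--         resposta += str(c) + ' '
--     return resposta
-- ===== Notes on version B (the rewrite author's own statement) =====
-- stated objective: alternative
-- what changed: A concatenates every number of the range into one big string and scans that string ten times with str.count; B never builds any string: it extracts each number's digits arithmetically (m % 10, m //= 10) into a 10-slot counter list and prints that list.
import Mathlib
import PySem

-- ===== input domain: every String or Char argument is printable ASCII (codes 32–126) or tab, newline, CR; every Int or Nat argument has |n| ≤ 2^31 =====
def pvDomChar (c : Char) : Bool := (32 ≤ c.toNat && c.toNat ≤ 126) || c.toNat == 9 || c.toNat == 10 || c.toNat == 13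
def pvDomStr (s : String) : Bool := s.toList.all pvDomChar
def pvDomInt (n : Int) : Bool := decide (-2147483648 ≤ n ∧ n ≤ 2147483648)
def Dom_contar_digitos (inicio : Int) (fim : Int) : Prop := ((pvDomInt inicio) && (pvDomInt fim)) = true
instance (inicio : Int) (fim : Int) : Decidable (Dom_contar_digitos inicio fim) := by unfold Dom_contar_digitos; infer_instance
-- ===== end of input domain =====

-- B replaces A's "concatenate the whole range into one big string, then scan it ten times
-- with str.count" by arithmetic digit extraction (m % 10, m //= 10) into a 10-slot counter
-- list; an alternative algorithm of the same asymptotic cost that builds no string at all.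

-- ===== PORT A =====
-- the 'while inicio <= fim' loop building 'sequencia'
def pvSeqLoop (inicio fim : Int) (sequencia : String) : String :=
  if inicio ≤ fim then pvSeqLoop (inicio + 1) fim (sequencia ++ PySem.Int.toStr inicio ++ " ")
  else sequencia
termination_by (fim + 1 - inicio).toNat
decreasing_by omega

def contar_digitos (inicio : Int) (fim : Int) : String :=
  let sequencia := pvSeqLoop inicio fim ""
  (PySem.List.pyRange 0 10 1).foldl
    (fun resposta i =>
      resposta ++ PySem.Int.toStr ((PySem.Str.count sequencia (PySem.Int.toStr i) : Nat) : Int) ++ " ")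
    ""

-- ===== PORT B =====
-- the 'while m > 0: counts[m % 10] += 1; m //= 10' inner loop
def pvDigitLoop (m : Int) (counts : List Int) : List Int :=
  if 0 < m then
    pvDigitLoop (PySem.Int.floordiv m 10)
      (PySem.List.pySetD counts (PySem.Int.mod m 10)
        (PySem.List.pyGetD counts (PySem.Int.mod m 10) 0 + 1))
  else counts
termination_by m.toNat
decreasing_by simp only [PySem.Int.floordiv_eq_ediv_of_pos (by norm_num : (0:Int) < 10)]; omega

def contar_digitos_alt (inicio : Int) (fim : Int) : String :=
  let counts :=
    (PySem.List.pyRange inicio (fim + 1) 1).foldl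
      (fun counts k =>
        let m := if k < 0 then -k else k
        if m = 0 then PySem.List.pySetD counts 0 (PySem.List.pyGetD counts 0 0 + 1)
        else pvDigitLoop m counts)
      (PySem.List.pyRepeat [(0 : Int)] 10)
  counts.foldl (fun resposta c => resposta ++ PySem.Int.toStr c ++ " ") ""

-- ===== PRECONDITION & SPEC =====
def Spec_contar_digitos (inicio : Int) (fim : Int) (out : String) : Prop := out = contar_digitos_alt inicio fim
instance (inicio : Int) (fim : Int) (out : String) : Decidable (Spec_contar_digitos inicio fim out) := by unfold Spec_contar_digitos; infer_instance

-- ===== CLAIM (what is proved, stated in full; the proofs are below) =====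
def Claim_equal_contar_digitos : Prop := ∀ (inicio : Int) (fim : Int), Dom_contar_digitos inicio fim → Spec_contar_digitos inicio fim (contar_digitos inicio fim)

-- ===== LEMMAS AND PROOFS =====

-- ghost: the characters of A's 'sequencia' (digits, minus signs and separating spaces)
def pvAllChars (a b : Int) : List Char :=
  if a ≤ b then PySem.Int.toChars a ++ ' ' :: pvAllChars (a + 1) b else []
termination_by (b + 1 - a).toNat
decreasing_by omega

theorem pvSeqLoop_toList (a b : Int) (s : String) :
    (pvSeqLoop a b s).toList = s.toList ++ pvAllChars a b := by
  by_cases h : a ≤ b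
  · rw [pvSeqLoop, if_pos h, pvAllChars, if_pos h,
      pvSeqLoop_toList (a + 1) b (s ++ PySem.Int.toStr a ++ " ")]
    simp [PySem.Int.toList_toStr]
  · rw [pvSeqLoop, if_neg h, pvAllChars, if_neg h]
    simp
termination_by (b + 1 - a).toNat
decreasing_by omega

-- single-character substring count is character count
theorem pvCount_go_singleton (c : Char) (l : List Char) (fuel acc : Nat)
    (h : l.length ≤ fuel) :
    PySem.Chars.count.go [c] fuel l acc = acc + l.count c := by
  induction fuel generalizing l acc with
  | zero =>
    have : l = [] := List.length_eq_zero_iff.mp (Nat.le_zero.mp h)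
    subst this
    simp [PySem.Chars.count.go]
  | succ n ih =>
    cases l with
    | nil => rfl
    | cons x t =>
      rw [PySem.Chars.count.go]
      by_cases hx : c = x
      · subst hx
        rw [if_pos (by simp [List.isPrefixOf])]
        simp only [List.length_cons, List.length_nil, List.drop_succ_cons, List.drop_zero]
        rw [ih t (acc + 1) (by simpa using h)]
        simp
        omega
      · rw [if_neg (by simp [List.isPrefixOf]; exact fun hxc => hx hxc)]
        rw [ih t acc (by simpa using h)]
        have hx' : ¬ (x = c) := fun h' => hx h'.symm
        simp [hx']

theorem pvCount_singleton (c : Char) (l : List Char) :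
    PySem.Chars.count l [c] = l.count c := by
  rw [PySem.Chars.count]
  rw [if_neg (by simp)]
  simpa using pvCount_go_singleton c l l.length 0 le_rfl

-- pointwise equality below 10 gives equality of the counter lists
theorem pvMap10_congr (f g : Nat → Int) (h : ∀ j, j < 10 → f j = g j) :
    (List.range 10).map f = (List.range 10).map g :=
  List.map_congr_left (fun j hj => h j (List.mem_range.mp hj))

-- setting one slot of a counter list in map-over-range form
theorem pvSet_map_range (g : Nat → Int) (i : Nat) (v : Int) (_hi : i < 10) :
    ((List.range 10).map g).set i v
      = (List.range 10).map (fun j => if j = i then v else g j) := by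
  apply List.ext_getElem
  · simp
  · intro j hj _
    simp only [List.getElem_set, List.getElem_map, List.getElem_range]
    rcases eq_or_ne i j with h | h
    · rw [if_pos h, if_pos h.symm]
    · rw [if_neg h, if_neg (Ne.symm h)]

-- the inner digit loop, acting on a counter list in map-over-range form
theorem pvDigitLoop_map (m : Int) (g : Nat → Int) (hm : 0 < m) :
    pvDigitLoop m ((List.range 10).map g)
      = (List.range 10).map
          (fun j => g j + ((Nat.toDigits 10 m.toNat).count (Nat.digitChar j) : Int)) := by
  have h10 : (0:Int) < 10 := by norm_num
  have hmod : PySem.Int.mod m 10 = ((m.toNat % 10 : Nat) : Int) := by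
    rw [PySem.Int.mod_eq_emod_of_pos h10]; omega
  have hdn : m.toNat % 10 < 10 := Nat.mod_lt _ (by norm_num)
  have hdiv : PySem.Int.floordiv m 10 = ((m.toNat / 10 : Nat) : Int) := by
    rw [PySem.Int.floordiv_eq_ediv_of_pos h10]; omega
  rw [pvDigitLoop, if_pos hm, hmod, hdiv,
    PySem.List.pyGetD_natCast, PySem.List.pySetD_natCast,
    PySem.List.getD_map_range _ _ _ _ hdn, pvSet_map_range _ _ _ hdn]
  by_cases hrec : 0 < ((m.toNat / 10 : Nat) : Int)
  · rw [pvDigitLoop_map _ _ hrec]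
    have hge : 10 ≤ m.toNat := by omega
    rw [Nat.toDigits_of_base_le (by norm_num) hge]
    apply pvMap10_congr
    intro j hj
    have : ((m.toNat / 10 : Nat) : Int).toNat = m.toNat / 10 := by omega
    rw [this]
    simp only [List.count_append, List.count_singleton]
    have hinj : Nat.digitChar (m.toNat % 10) = Nat.digitChar j ↔ m.toNat % 10 = j := by
      have := (by decide : ∀ a < 10, ∀ b < 10, (Nat.digitChar a = Nat.digitChar b ↔ a = b))
      exact this _ hdn _ hj
    simp only [beq_iff_eq]
    by_cases hje : j = m.toNat % 10
    · subst hje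
      rw [if_pos rfl, if_pos rfl]
      push_cast
      ring
    · rw [if_neg hje, if_neg (fun hc => hje (hinj.mp hc).symm)]
      push_cast
      ring
  · have hlt : m.toNat < 10 := by omega
    rw [pvDigitLoop, if_neg hrec, Nat.toDigits_of_lt_base hlt]
    apply pvMap10_congr
    intro j hj
    have hinj : Nat.digitChar m.toNat = Nat.digitChar j ↔ m.toNat = j := by
      have := (by decide : ∀ a < 10, ∀ b < 10, (Nat.digitChar a = Nat.digitChar b ↔ a = b))
      exact this _ hlt _ hj
    have hm0 : m.toNat % 10 = m.toNat := Nat.mod_eq_of_lt hlt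
    rw [hm0, List.count_singleton]
    simp only [beq_iff_eq]
    by_cases hje : j = m.toNat
    · subst hje
      rw [if_pos rfl, if_pos rfl]
      norm_num
    · rw [if_neg hje, if_neg (fun hc => hje (hinj.mp hc).symm)]
      ring
termination_by m.toNat
decreasing_by omega

-- one number of the range, pushed through B's per-k body
theorem pvStep_map (k : Int) (g : Nat → Int) :
    (let m := if k < 0 then -k else k
     if m = 0 then
       PySem.List.pySetD ((List.range 10).map g) 0
         (PySem.List.pyGetD ((List.range 10).map g) 0 0 + 1)
     else pvDigitLoop m ((List.range 10).map g))
      = (List.range 10).map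
          (fun j => g j + ((PySem.Int.toChars k).count (Nat.digitChar j) : Int)) := by
  have hnd : ∀ j < 10, Nat.digitChar j ≠ '-' := by decide
  by_cases hk : k < 0
  · have hm : ¬ (-k = 0) := by omega
    have hpos : 0 < -k := by omega
    simp only [if_pos hk, if_neg hm]
    rw [pvDigitLoop_map _ _ hpos]
    apply pvMap10_congr
    intro j hj
    rw [PySem.Int.toChars, if_pos hk]
    have : (-k).toNat = k.natAbs := by omega
    rw [this, List.count_cons]
    simp only [beq_iff_eq]
    rw [if_neg (fun hc => hnd j hj hc.symm)]
    simp
  · by_cases hk0 : k = 0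
    · subst hk0
      simp only [if_neg hk]
      have h0 : ((0:Nat) : Int) = 0 := rfl
      rw [← h0, PySem.List.pyGetD_natCast, PySem.List.pySetD_natCast,
        PySem.List.getD_map_range _ _ _ _ (by norm_num), pvSet_map_range _ _ _ (by norm_num),
        if_pos trivial]
      apply pvMap10_congr
      intro j hj
      rw [h0]
      have : PySem.Int.toChars 0 = ['0'] := by decide
      rw [this, List.count_singleton]
      simp only [beq_iff_eq]
      have hinj : ('0' : Char) = Nat.digitChar j ↔ 0 = j := by
        have := (by decide : ∀ b < 10, (('0' : Char) = Nat.digitChar b ↔ 0 = b))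
        exact this _ hj
      by_cases hje : j = 0
      · subst hje
        rw [if_pos (hinj.mpr rfl)]
        norm_num
      · rw [if_neg hje, if_neg (fun hc => hje (hinj.mp hc).symm)]
        ring
    · have hpos : 0 < k := by omega
      simp only [if_neg hk, if_neg hk0]
      rw [pvDigitLoop_map _ _ hpos]
      apply pvMap10_congr
      intro j _
      rw [PySem.Int.toChars, if_neg (by omega)]

-- B's fold over the whole range, in map-over-range form
theorem pvRangeFold_map (a b : Int) (g : Nat → Int) :
    (PySem.List.pyRange a (b + 1) 1).foldl
      (fun counts k =>
        let m := if k < 0 then -k else k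
        if m = 0 then PySem.List.pySetD counts 0 (PySem.List.pyGetD counts 0 0 + 1)
        else pvDigitLoop m counts)
      ((List.range 10).map g)
      = (List.range 10).map
          (fun j => g j + ((pvAllChars a b).count (Nat.digitChar j) : Int)) := by
  have hnd : ∀ j < 10, Nat.digitChar j ≠ ' ' := by decide
  by_cases h : a ≤ b
  · rw [PySem.List.pyRange_one_cons (by omega), List.foldl_cons, pvStep_map,
      pvRangeFold_map (a + 1) b]
    conv_rhs => rw [pvAllChars, if_pos h]
    apply pvMap10_congr
    intro j hj
    simp only [List.count_append, List.count_cons, beq_iff_eq]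
    rw [if_neg (fun hc => hnd j hj hc.symm)]
    push_cast
    ring
  · rw [PySem.List.pyRange_one_eq_nil (by omega), List.foldl_nil, pvAllChars, if_neg h]
    simp
termination_by (b + 1 - a).toNat
decreasing_by omega

-- one of A's ten output terms, as a term over the ghost character list
theorem pvACount (a b : Int) (i : Int) (c : Char)
    (hic : (PySem.Int.toStr i).toList = [c]) :
    ((PySem.Str.count (pvSeqLoop a b "") (PySem.Int.toStr i) : Nat) : Int)
      = ((pvAllChars a b).count c : Int) := by
  rw [PySem.Str.count_eq, hic, pvCount_singleton, pvSeqLoop_toList]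
  simp

theorem contar_digitos_eq_alt (a b : Int) : contar_digitos a b = contar_digitos_alt a b := by
  unfold contar_digitos contar_digitos_alt
  have hrep : PySem.List.pyRepeat [(0 : Int)] 10 = (List.range 10).map (fun _ => (0 : Int)) := by
    decide
  rw [hrep, pvRangeFold_map a b (fun _ => 0)]
  have hr10 : List.range 10 = [0, 1, 2, 3, 4, 5, 6, 7, 8, 9] := by decide
  have hr : PySem.List.pyRange 0 10 1 = [0, 1, 2, 3, 4, 5, 6, 7, 8, 9] := by decide
  rw [hr10, hr]
  simp only [List.map, List.foldl]
  rw [pvACount a b 0 '0' rfl, pvACount a b 1 '1' rfl, pvACount a b 2 '2' rfl,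
    pvACount a b 3 '3' rfl, pvACount a b 4 '4' rfl, pvACount a b 5 '5' rfl,
    pvACount a b 6 '6' rfl, pvACount a b 7 '7' rfl, pvACount a b 8 '8' rfl,
    pvACount a b 9 '9' rfl]
  simp only [(by decide : Nat.digitChar 0 = '0'), (by decide : Nat.digitChar 1 = '1'),
    (by decide : Nat.digitChar 2 = '2'), (by decide : Nat.digitChar 3 = '3'),
    (by decide : Nat.digitChar 4 = '4'), (by decide : Nat.digitChar 5 = '5'),
    (by decide : Nat.digitChar 6 = '6'), (by decide : Nat.digitChar 7 = '7'),
    (by decide : Nat.digitChar 8 = '8'), (by decide : Nat.digitChar 9 = '9'), zero_add]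

-- ===== VERDICT (by name: the statement is the Claim_ definition above) =====
theorem contar_digitos_spec : Claim_equal_contar_digitos := by
  intro inicio fim _
  unfold Spec_contar_digitos
  exact contar_digitos_eq_alt inicio fim
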